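-- pv_equiv track=rewrite | github.com/qhxiv/code-ptit-solutions | Python/ICPC0114 - PERFECT PRIME.py | check
-- ===== SOURCE A (Python) =====
-- import math
--
-- def isPrime(n):
--     for i in range(2, math.floor(math.sqrt(n)) + 1):
--         if ((n % i == 0)):
--             return False
--     return n >= 2
--
-- def check(n):
--     if (not isPrime(n)):
--         return False
--     if (not isPrime(int(str(n)[::-1]))):
--         return False
--     s = 0
--     while (n > 0):
--         d = int(n % 10)
--         if (not isPrime(d)):
--             return False
--         s += d
--         n //= 10
--     if (not isPrime(s)):
--         return False
--     return True
-- ===== SOURCE B (Python) =====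
-- import math
--
-- def check(n):
--     s = str(n)
--     if any(c not in "2357" for c in s):
--         return False
--     rev = int(s[::-1])
--     dsum = sum(int(c) for c in s)
--     limit = math.isqrt(max(n, rev))
--     sieve = [True] * (limit + 1)
--     sieve[0] = False
--     sieve[1] = False
--     for p in range(2, math.isqrt(limit) + 1):
--         if sieve[p]:
--             for m in range(p * p, limit + 1, p):
--                 sieve[m] = False
--     primes = [i for i, flag in enumerate(sieve) if flag]
--     def good(m):
--         return m >= 2 and all(m % p for p in primes if p * p <= m)
--     return good(n) and good(rev) and good(dsum)
-- ===== Notes on version B (the rewrite author's own statement) =====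
-- stated objective: alternative
-- what changed: B inverts A's structure: it first rejects any number whose decimal string has a digit outside {2,3,5,7}, then builds one Sieve-of-Eratosthenes prime table up to isqrt(max(n, reversed n)) and tests n, the reversal and the digit sum by dividing only by sieved primes, replacing A's three full trial-division scans and its %10 digit loop.
import Mathlib
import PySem

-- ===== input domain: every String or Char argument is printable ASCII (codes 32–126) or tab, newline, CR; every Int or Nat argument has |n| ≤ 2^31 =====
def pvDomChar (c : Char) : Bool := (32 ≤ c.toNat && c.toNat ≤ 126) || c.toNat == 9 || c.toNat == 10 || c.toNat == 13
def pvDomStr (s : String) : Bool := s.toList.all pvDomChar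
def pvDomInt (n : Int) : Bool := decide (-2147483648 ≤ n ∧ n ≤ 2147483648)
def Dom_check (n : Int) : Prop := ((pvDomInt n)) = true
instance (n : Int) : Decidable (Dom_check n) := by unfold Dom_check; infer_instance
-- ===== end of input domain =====

-- B replaces A's four trial-division primality checks with a string digit guard followed by one
-- Sieve-of-Eratosthenes prime table shared by the three remaining tests (objective: alternative;
-- no speed claim).

-- ===== PORT A =====
-- math.floor(math.sqrt(n)) is exact as Nat.sqrt n.toNat on every value A feeds it under Dom
-- (0 ≤ n < 2^34, where the correctly rounded double sqrt floors to the integer sqrt).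
def isPrimeA (n : Int) : Bool :=
  if (PySem.List.pyRange 2 (((Nat.sqrt n.toNat : Nat) : Int) + 1) 1).any
      (fun i => PySem.Int.mod n i == 0) then false
  else decide (2 ≤ n)

def digitLoopA (n s : Int) : Option Int :=
  if _h : 0 < n then
    let d := PySem.Int.mod n 10
    if isPrimeA d then digitLoopA (PySem.Int.floordiv n 10) (s + d) else none
  else some s
termination_by n.toNat
decreasing_by
  simp only [PySem.Int.floordiv, Int.fdiv_eq_ediv_of_nonneg _ (by omega : (0:Int) ≤ (10:Int))]
  omega

def check (n : Int) : Bool :=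
  if !isPrimeA n then false
  else
    match (PySem.Str.slice? (PySem.Int.toStr n) none none (-1)).bind PySem.Int.ofStr? with
    | none => false  -- unreachable here: for n ≥ 2 the reversed digit string always parses
    | some r =>
      if !isPrimeA r then false
      else
        match digitLoopA n 0 with
        | none => false
        | some s => if !isPrimeA s then false else true

-- ===== PORT B =====
-- math.isqrt(n) is exactly Nat.sqrt on the nonnegative values B feeds it.
def isqrtI (n : Int) : Int := ((Nat.sqrt n.toNat : Nat) : Int)

-- Sieve of Eratosthenes up to limit, as in Source B: a boolean list, False at 0 and 1,
-- then striking multiples p*p, p*p+p, … for each p up to isqrt(limit) still marked.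
def sieveB (limit : Int) : List Bool :=
  let s0 := PySem.List.pySetD (PySem.List.pySetD (List.replicate (limit + 1).toNat true) 0 false) 1 false
  (PySem.List.pyRange 2 (isqrtI limit + 1) 1).foldl
    (fun sv p =>
      if PySem.List.pyGetD sv p false then
        (PySem.List.pyRange (p * p) (limit + 1) p).foldl
          (fun sv2 m => PySem.List.pySetD sv2 m false) sv
      else sv) s0

def primesB (limit : Int) : List Int :=
  ((PySem.List.enumerate (sieveB limit) 0).filter (fun x => x.2)).map (fun x => x.1)

-- good(m): m >= 2 and all(m % p for p in primes if p * p <= m)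
def goodB (primes : List Int) (m : Int) : Bool :=
  decide (2 ≤ m) &&
    (primes.filter (fun p => decide (p * p ≤ m))).all (fun p => !(PySem.Int.mod m p == 0))

def check_alt (n : Int) : Bool :=
  let cs := PySem.Int.toChars n
  if cs.any (fun c => !(['2', '3', '5', '7'].contains c)) then false
  else
    match (PySem.Str.slice? (PySem.Int.toStr n) none none (-1)).bind PySem.Int.ofStr? with
    | none => false  -- unreachable here: the all-digit string always parses
    | some rev =>
      -- int(c) is exact as c.toNat - 48 on the decimal-digit chars reaching here
      let dsum := (cs.map (fun c => ((c.toNat : Int) - 48))).sum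
      let limit := isqrtI (max n rev)
      let primes := primesB limit
      goodB primes n && goodB primes rev && goodB primes dsum

-- ===== PRECONDITION & SPEC =====
-- Pre_ excludes n < 0, on which A raises ValueError (math.sqrt of a negative number).
def Pre_check (n : Int) : Prop := 0 ≤ n
instance (n : Int) : Decidable (Pre_check n) := by unfold Pre_check; infer_instance
def pvWitness_check : Int := (7)

def Spec_check (n : Int) (out : Bool) : Prop := out = check_alt n
instance (n : Int) (out : Bool) : Decidable (Spec_check n out) := by unfold Spec_check; infer_instance

-- ===== CLAIM (what is proved, stated in full; the proofs are below) =====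
def Claim_equal_check : Prop := ∀ (n : Int), Dom_check n → Pre_check n → Spec_check n (check n)

-- ===== LEMMAS AND PROOFS =====

-- the little-endian digit list A's while-loop walks (proof-only helper)
def digitsM (m : Int) : List Int :=
  if _h : 0 < m then PySem.Int.mod m 10 :: digitsM (PySem.Int.floordiv m 10) else []
termination_by m.toNat
decreasing_by
  simp only [PySem.Int.floordiv, Int.fdiv_eq_ediv_of_nonneg _ (by omega : (0:Int) ≤ (10:Int))]
  omega

theorem isPrimeA_iff (n : Int) (hn : 2 ≤ n) :
    (isPrimeA n = true ↔ ∀ j : Int, 2 ≤ j → j * j ≤ n → ¬ PySem.Int.mod n j = 0) := by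
  rw [isPrimeA]
  cases hany : (PySem.List.pyRange 2 (((Nat.sqrt n.toNat : Nat) : Int) + 1) 1).any
      (fun i => PySem.Int.mod n i == 0)
  · rw [List.any_eq_false] at hany
    simp only [Bool.false_eq_true, if_false, decide_eq_true_eq]
    constructor
    · intro _ j hj hjj hdvd
      have hmem : j ∈ PySem.List.pyRange 2 (((Nat.sqrt n.toNat : Nat) : Int) + 1) 1 := by
        rw [PySem.List.mem_pyRange_one]
        refine ⟨hj, ?_⟩
        have h0j : (0:Int) ≤ j := by omega
        have h0n : (0:Int) ≤ n := by omega
        have hj' : j.toNat * j.toNat ≤ n.toNat := by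
          rw [← Int.toNat_of_nonneg h0j, ← Int.toNat_of_nonneg h0n] at hjj
          exact_mod_cast hjj
        have := Nat.le_sqrt.mpr hj'
        omega
      have := hany j hmem
      simp only [beq_iff_eq] at this
      exact this hdvd
    · intro _
      exact hn
  · rw [List.any_eq_true] at hany
    obtain ⟨j, hmem, hdvd⟩ := hany
    rw [PySem.List.mem_pyRange_one] at hmem
    simp only [beq_iff_eq] at hdvd
    simp only [if_true, Bool.false_eq_true, false_iff]
    intro hall
    refine hall j hmem.1 ?_ hdvd
    have hj' : j.toNat ≤ Nat.sqrt n.toNat := by omega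
    have hmul := Nat.mul_le_mul hj' hj'
    have hs : Nat.sqrt n.toNat * Nat.sqrt n.toNat ≤ n.toNat := by
      have := Nat.sqrt_le' n.toNat
      nlinarith [this]
    have hle : j.toNat * j.toNat ≤ n.toNat := le_trans hmul hs
    have h2 : (2:Int) ≤ j := hmem.1
    have hcast : (j.toNat : Int) * (j.toNat : Int) ≤ (n.toNat : Int) := by exact_mod_cast hle
    have h0j : (0:Int) ≤ j := by omega
    have h0n : (0:Int) ≤ n := by omega
    rw [Int.toNat_of_nonneg h0j, Int.toNat_of_nonneg h0n] at hcast
    exact hcast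

theorem isPrimeA_lt_two (n : Int) (h : n < 2) : isPrimeA n = false := by
  rw [isPrimeA]
  have hd : decide (2 ≤ n) = false := by simp; omega
  rw [hd]
  split <;> rfl

theorem digit_bounds (m : Int) : 0 ≤ PySem.Int.mod m 10 ∧ PySem.Int.mod m 10 < 10 := by
  simp only [PySem.Int.mod, Int.fmod_eq_emod]
  have : (0:Int) ≤ 10 := by omega
  simp only [this, true_or, if_pos]
  omega

theorem isPrimeA_digit (d : Int) (h0 : 0 ≤ d) (h9 : d < 10) :
    isPrimeA d = [(2:Int),3,5,7].contains d := by
  interval_cases d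
  · rw [isPrimeA_lt_two 0 (by omega)]; rfl
  · rw [isPrimeA_lt_two 1 (by omega)]; rfl
  all_goals
    rw [Bool.eq_iff_iff, isPrimeA_iff _ (by omega)]
    constructor
    · intro hall
      first
      | decide
      | exact absurd (by decide) (hall 2 (by decide) (by decide))
      | exact absurd (by decide) (hall 3 (by decide) (by decide))
    · intro hc j hj hjj hm
      first
      | exact absurd hc (by decide)
      | (have hub : j ≤ 3 := by nlinarith [sq_nonneg (j - 3)]
         interval_cases j <;> revert hjj hm <;> decide)

theorem digitLoopA_eq (n s : Int) :
    digitLoopA n s =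
      if (digitsM n).all (fun d => [(2:Int),3,5,7].contains d)
      then some (s + (digitsM n).sum) else none := by
  induction n, s using digitLoopA.induct with
  | case1 n s h d hp ih =>
    rw [digitLoopA, dif_pos h]
    simp only []
    rw [if_pos hp, ih]
    conv_rhs => rw [digitsM]
    rw [dif_pos h]
    obtain ⟨hd0, hd9⟩ := digit_bounds n
    rw [isPrimeA_digit _ hd0 hd9] at hp
    simp only [List.all_cons, hp, Bool.true_and, List.sum_cons]
    split
    · congr 1; ring
    · rfl
  | case2 n s h d hp =>
    rw [digitLoopA, dif_pos h]
    simp only []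
    rw [if_neg hp]
    conv_rhs => rw [digitsM]
    rw [dif_pos h]
    obtain ⟨hd0, hd9⟩ := digit_bounds n
    rw [isPrimeA_digit _ hd0 hd9] at hp
    simp only [List.all_cons, hp, Bool.false_and, Bool.false_eq_true, if_false]
  | case3 n s h =>
    rw [digitLoopA, dif_neg h]
    conv_rhs => rw [digitsM]
    rw [dif_neg h]
    simp

-- ----- string digits ↔ mod-10 digits -----

theorem toDigitsCore_eq (n : Nat) : ∀ (fuel : Nat) (ds : List Char), n < fuel → 0 < n →
    Nat.toDigitsCore 10 fuel n ds = ((Nat.digits 10 n).map Nat.digitChar).reverse ++ ds := by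
  induction n using Nat.strong_induction_on with
  | _ n ih =>
    intro fuel ds hfuel hpos
    match fuel with
    | fuel + 1 =>
      rw [Nat.toDigitsCore]
      rw [Nat.digits_def' (by norm_num : 1 < 10) hpos]
      by_cases h10 : n / 10 = 0
      · rw [if_pos h10, h10, Nat.digits_zero]
        simp
      · rw [if_neg h10]
        rw [ih (n / 10) (by omega) fuel (Nat.digitChar (n % 10) :: ds) (by omega) (by omega)]
        simp

theorem toChars_eq (n : Int) (h : 0 < n) :
    PySem.Int.toChars n = ((Nat.digits 10 n.toNat).map Nat.digitChar).reverse := by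
  rw [PySem.Int.toChars, if_neg (by omega), Nat.toDigits]
  rw [toDigitsCore_eq n.toNat (n.toNat + 1) [] (by omega) (by omega)]
  simp

theorem digitsM_eq (n : Int) (h : 0 ≤ n) :
    digitsM n = (Nat.digits 10 n.toNat).map (Nat.cast : Nat → Int) := by
  induction n using digitsM.induct with
  | case1 n hn ih =>
    rw [digitsM, dif_pos hn]
    have hmod : PySem.Int.mod n 10 = ((n.toNat % 10 : Nat) : Int) := by
      rw [PySem.Int.mod_eq_emod_of_pos (by omega)]; omega
    have hdiv : PySem.Int.floordiv n 10 = ((n.toNat / 10 : Nat) : Int) := by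
      rw [PySem.Int.floordiv_eq_ediv_of_pos (by omega)]; omega
    rw [Nat.digits_def' (by norm_num : 1 < 10) (by omega : 0 < n.toNat)]
    have hd : (PySem.Int.floordiv n 10).toNat = n.toNat / 10 := by rw [hdiv]; omega
    rw [List.map_cons, hmod, ih (by rw [hdiv]; positivity), hd]
  | case2 n hn =>
    rw [digitsM, dif_neg hn]
    have : n = 0 := by omega
    subst this
    simp

theorem digitChar_mem (d : Nat) (h : d < 10) :
    (['2','3','5','7'].contains (Nat.digitChar d)) = ([(2:Int),3,5,7].contains (d : Int)) := by
  interval_cases d <;> decide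

theorem digitChar_val (d : Nat) (h : d < 10) :
    (((Nat.digitChar d).toNat : Int) - 48) = (d : Int) := by
  interval_cases d <;> decide

theorem guard_eq (n : Int) (h : 0 < n) :
    (PySem.Int.toChars n).any (fun c => !(['2','3','5','7'].contains c))
      = !((digitsM n).all (fun d => [(2:Int),3,5,7].contains d)) := by
  rw [toChars_eq n h, digitsM_eq n (le_of_lt h), List.any_reverse, List.any_map, List.all_map,
    List.not_all_eq_any_not]
  rw [Bool.eq_iff_iff, List.any_eq_true, List.any_eq_true]
  constructor
  · rintro ⟨d, hd, hP⟩
    refine ⟨d, hd, ?_⟩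
    simp only [Function.comp_apply] at hP
    rwa [digitChar_mem d (Nat.digits_lt_base (by norm_num) hd)] at hP
  · rintro ⟨d, hd, hP⟩
    refine ⟨d, hd, ?_⟩
    simp only [Function.comp_apply]
    rwa [digitChar_mem d (Nat.digits_lt_base (by norm_num) hd)]

theorem dsum_eq (n : Int) (h : 0 < n) :
    ((PySem.Int.toChars n).map (fun c => ((c.toNat : Int) - 48))).sum = (digitsM n).sum := by
  rw [toChars_eq n h, digitsM_eq n (le_of_lt h), List.map_reverse, List.sum_reverse, List.map_map]
  congr 1
  apply List.map_congr_left
  intro d hd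
  simp only [Function.comp_apply]
  exact digitChar_val d (Nat.digits_lt_base (by norm_num) hd)


theorem digitsum_le (n : Int) (h : 0 ≤ n) : (digitsM n).sum ≤ n := by
  induction n using digitsM.induct with
  | case1 n hn ih =>
    rw [digitsM, dif_pos hn]
    have hdiv : PySem.Int.floordiv n 10 = n / 10 := PySem.Int.floordiv_eq_ediv_of_pos (by omega)
    have hmod : PySem.Int.mod n 10 = n % 10 := PySem.Int.mod_eq_emod_of_pos (by omega)
    have := ih (by rw [hdiv]; omega)
    rw [List.sum_cons, hmod, hdiv] at *
    omega
  | case2 n hn =>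
    rw [digitsM, dif_neg hn]
    simp
    omega

-- ----- sieve facts -----

theorem foldl_setFalse_true {l : List Bool} {idxs : List Int} {k : Nat}
    (hnn : ∀ m ∈ idxs, 0 ≤ m)
    (h : (idxs.foldl (fun a m => PySem.List.pySetD a m false) l)[k]? = some true) :
    l[k]? = some true := by
  induction idxs generalizing l with
  | nil => exact h
  | cons m ms ih =>
    rw [List.foldl_cons] at h
    have h2 := ih (fun x hx => hnn x (List.mem_cons_of_mem _ hx)) h
    rw [PySem.List.pySetD_of_nonneg _ _ (hnn m List.mem_cons_self)] at h2
    rw [List.getElem?_set] at h2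
    split at h2
    · split at h2 <;> simp_all
    · exact h2

theorem foldl_setFalse_pres {l : List Bool} {idxs : List Int} {k : Nat}
    (hnn : ∀ m ∈ idxs, 0 ≤ m) (hne : ∀ m ∈ idxs, m ≠ (k : Int))
    (h : l[k]? = some true) :
    (idxs.foldl (fun a m => PySem.List.pySetD a m false) l)[k]? = some true := by
  induction idxs generalizing l with
  | nil => exact h
  | cons m ms ih =>
    rw [List.foldl_cons]
    refine ih (fun x hx => hnn x (List.mem_cons_of_mem _ hx))
      (fun x hx => hne x (List.mem_cons_of_mem _ hx)) ?_
    rw [PySem.List.pySetD_of_nonneg _ _ (hnn m List.mem_cons_self)]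
    rw [List.getElem?_set]
    have hm0 := hnn m List.mem_cons_self
    have hmne := hne m List.mem_cons_self
    rw [if_neg (by omega)]
    exact h

theorem outer_true (limit : Int) (ps : List Int) (hp : ∀ p ∈ ps, 0 < p) :
    ∀ (l : List Bool) (k : Nat),
    ((ps.foldl (fun sv p =>
        if PySem.List.pyGetD sv p false then
          (PySem.List.pyRange (p * p) (limit + 1) p).foldl
            (fun sv2 m => PySem.List.pySetD sv2 m false) sv
        else sv) l)[k]? = some true) → l[k]? = some true := by
  induction ps with
  | nil => intro l k h; exact h
  | cons p ps ih =>
    intro l k h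
    rw [List.foldl_cons] at h
    have hstep := ih (fun x hx => hp x (List.mem_cons_of_mem _ hx)) _ k h
    split at hstep
    · refine foldl_setFalse_true ?_ hstep
      intro m hm
      have hp0 := hp p List.mem_cons_self
      have := (PySem.List.mem_pyRange_iff_of_pos hp0 m).mp hm
      nlinarith [this.1]
    · exact hstep

theorem outer_pres (limit : Int) (ps : List Int) (q : Nat) (hq : Nat.Prime q)
    (hp : ∀ p ∈ ps, 2 ≤ p) :
    ∀ (l : List Bool),
    (l[q]? = some true) →
    ((ps.foldl (fun sv p =>
        if PySem.List.pyGetD sv p false then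
          (PySem.List.pyRange (p * p) (limit + 1) p).foldl
            (fun sv2 m => PySem.List.pySetD sv2 m false) sv
        else sv) l)[q]? = some true) := by
  induction ps with
  | nil => intro l h; exact h
  | cons p ps ih =>
    intro l h
    rw [List.foldl_cons]
    refine ih (fun x hx => hp x (List.mem_cons_of_mem _ hx)) _ ?_
    have hp2 := hp p List.mem_cons_self
    split
    · refine foldl_setFalse_pres ?_ ?_ h
      · intro m hm
        have := (PySem.List.mem_pyRange_iff_of_pos (by omega) m).mp hm
        nlinarith [this.1]
      · intro m hm hmq
        have hmem := (PySem.List.mem_pyRange_iff_of_pos (by omega : (0:Int) < p) m).mp hm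
        -- p divides m, p*p ≤ m = q, q prime: contradiction
        have hdvd : p ∣ m := by
          have h1 : p ∣ m - p * p := hmem.2.2
          have h2 : p ∣ p * p := Dvd.intro p rfl
          have h3 := dvd_add h1 h2
          simpa using h3
        rw [hmq] at hmem hdvd
        have hple : p * p ≤ (q : Int) := hmem.1
        have hpq : p.toNat ∣ q := by
          have : (p.toNat : Int) = p := Int.toNat_of_nonneg (by omega)
          rw [← Int.natCast_dvd_natCast]
          rw [this]
          exact hdvd
        rcases (Nat.Prime.eq_one_or_self_of_dvd hq _ hpq) with h1 | h1
        · omega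
        · have : (p.toNat : Int) = p := Int.toNat_of_nonneg (by omega)
          have hpq' : p = (q : Int) := by omega
          rw [hpq'] at hple
          nlinarith [hq.two_le]
    · exact h

theorem s0_spec (limit : Int) (k : Nat) :
    (PySem.List.pySetD (PySem.List.pySetD (List.replicate (limit + 1).toNat true) 0 false) 1
        false)[k]? = some true ↔ (2 ≤ k ∧ k < (limit + 1).toNat) := by
  rw [PySem.List.pySetD_of_nonneg _ _ (by omega : (0:Int) ≤ 1),
      PySem.List.pySetD_of_nonneg _ _ (by omega : (0:Int) ≤ 0)]
  rw [List.getElem?_set, List.getElem?_set]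
  simp only [List.length_set, List.length_replicate, List.getElem?_replicate]
  constructor
  · intro h
    split at h
    · split at h <;> simp_all
    · split at h
      · split at h <;> simp_all
      · split at h <;> simp_all
        omega
  · intro ⟨h2, hlt⟩
    rw [if_neg (by omega), if_neg (by omega), if_pos hlt]

theorem sieveB_true_iff_pre (limit : Int) (k : Nat)
    (h : (sieveB limit)[k]? = some true) : 2 ≤ k ∧ k < (limit + 1).toNat := by
  rw [sieveB] at h
  have := outer_true limit _ (fun p hp => by
      rw [PySem.List.mem_pyRange_one] at hp; omega) _ k h
  exact (s0_spec limit k).mp this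

theorem sieveB_prime_true (limit : Int) (q : Nat) (hq : Nat.Prime q)
    (hle : (q : Int) ≤ limit) : (sieveB limit)[q]? = some true := by
  rw [sieveB]
  refine outer_pres limit _ q hq (fun p hp => by
      rw [PySem.List.mem_pyRange_one] at hp; exact hp.1) _ ?_
  rw [s0_spec]
  have := hq.two_le
  omega

theorem mem_enumerate_iff {α : Type} (l : List α) (x : Int × α) :
    ∀ (s : Int), x ∈ PySem.List.enumerate l s ↔
      ∃ k : Nat, ∃ h : k < l.length, x.1 = s + k ∧ x.2 = l[k] := by
  induction l with
  | nil => intro s; simp [PySem.List.enumerate_nil]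
  | cons a l ih =>
    intro s
    rw [PySem.List.enumerate_cons, List.mem_cons, ih (s + 1)]
    constructor
    · rintro (rfl | ⟨k, hk, h1, h2⟩)
      · exact ⟨0, by simp, by simp⟩
      · exact ⟨k + 1, by simpa using hk, by push_cast; omega, by simpa using h2⟩
    · rintro ⟨k, hk, h1, h2⟩
      match k with
      | 0 =>
        left
        simp at h1 h2
        obtain ⟨x1, x2⟩ := x
        simp_all
      | k + 1 =>
        right
        refine ⟨k, by simpa using hk, by push_cast at h1 ⊢; omega, by simpa using h2⟩

theorem mem_primesB (limit : Int) (p : Int) :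
    p ∈ primesB limit ↔ ∃ k : Nat, p = (k : Int) ∧ (sieveB limit)[k]? = some true := by
  rw [primesB, List.mem_map]
  constructor
  · rintro ⟨x, hx, rfl⟩
    rw [List.mem_filter] at hx
    obtain ⟨hmem, hsnd⟩ := hx
    rw [mem_enumerate_iff] at hmem
    obtain ⟨k, hk, h1, h2⟩ := hmem
    refine ⟨k, by omega, ?_⟩
    rw [List.getElem?_eq_getElem hk, ← h2]
    exact congrArg some hsnd
  · rintro ⟨k, rfl, hget⟩
    obtain ⟨hk, hval⟩ := List.getElem?_eq_some_iff.mp hget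
    refine ⟨((k : Int), (sieveB limit)[k]), ?_, rfl⟩
    rw [List.mem_filter]
    constructor
    · rw [mem_enumerate_iff]
      exact ⟨k, hk, by omega, rfl⟩
    · rw [List.getElem?_eq_getElem hk] at hget
      simpa using Option.some.inj hget

theorem primesB_ge_two (limit : Int) (p : Int) (h : p ∈ primesB limit) : 2 ≤ p := by
  rw [mem_primesB] at h
  obtain ⟨k, rfl, hget⟩ := h
  have := (sieveB_true_iff_pre limit k hget).1
  omega

theorem primesB_complete (limit : Int) (q : Nat) (hq : Nat.Prime q)
    (hle : (q : Int) ≤ limit) : (q : Int) ∈ primesB limit := by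
  rw [mem_primesB]
  exact ⟨q, rfl, sieveB_prime_true limit q hq hle⟩

theorem le_isqrtI (q M : Int) (h0 : 0 < q) (h : q * q ≤ M) : q ≤ isqrtI M := by
  rw [isqrtI]
  have hM : 0 ≤ M := by nlinarith
  have hq : (q.toNat : Int) = q := Int.toNat_of_nonneg (by omega)
  have hMn : (M.toNat : Int) = M := Int.toNat_of_nonneg hM
  have hnat : q.toNat * q.toNat ≤ M.toNat := by
    have : (q.toNat : Int) * (q.toNat : Int) ≤ (M.toNat : Int) := by rw [hq, hMn]; exact h
    exact_mod_cast this
  have := Nat.le_sqrt.mpr hnat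
  omega


theorem goodB_eq (limit m : Int)
    (Hm : ∀ j : Int, 0 < j → j * j ≤ m → j ≤ limit) :
    goodB (primesB limit) m = isPrimeA m := by
  by_cases hm2 : 2 ≤ m
  · rw [Bool.eq_iff_iff, isPrimeA_iff m hm2]
    rw [goodB, Bool.and_eq_true, decide_eq_true_eq, List.all_eq_true]
    constructor
    · rintro ⟨-, hall⟩ j hj hjj hmod
      have hdvd : j ∣ m := (PySem.Int.mod_eq_zero_iff_dvd m j).mp hmod
      set q : Nat := j.toNat.minFac with hqdef
      have hj2 : 2 ≤ j.toNat := by omega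
      have hqp : Nat.Prime q := Nat.minFac_prime (by omega)
      have hqj : (q : Int) ≤ j := by
        have := Nat.minFac_le (by omega : 0 < j.toNat)
        omega
      have hq2 : 2 ≤ (q : Int) := by exact_mod_cast hqp.two_le
      have hqdvdj : (q : Int) ∣ j := by
        have h1 : q ∣ j.toNat := Nat.minFac_dvd _
        have h2 : ((j.toNat : Nat) : Int) = j := Int.toNat_of_nonneg (by omega)
        rw [← h2]
        exact_mod_cast h1
      have hqm : (q : Int) ∣ m := dvd_trans hqdvdj hdvd
      have hqq : (q : Int) * (q : Int) ≤ m := by nlinarith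
      have hmem : (q : Int) ∈ primesB limit :=
        primesB_complete limit q hqp (Hm (q : Int) (by omega) hqq)
      have := hall _ (List.mem_filter.mpr ⟨hmem, by simpa using hqq⟩)
      simp only [Bool.not_eq_eq_eq_not, Bool.not_true, beq_eq_false_iff_ne] at this
      exact this ((PySem.Int.mod_eq_zero_iff_dvd m (q : Int)).mpr hqm)
    · intro hall
      refine ⟨hm2, ?_⟩
      intro p hp
      rw [List.mem_filter] at hp
      obtain ⟨hpmem, hple⟩ := hp
      have hp2 := primesB_ge_two limit p hpmem
      have := hall p hp2 (by simpa using hple)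
      simp only [Bool.not_eq_eq_eq_not, Bool.not_true, beq_eq_false_iff_ne]
      exact this
  · rw [isPrimeA_lt_two m (by omega), goodB]
    have : decide (2 ≤ m) = false := by simp; omega
    rw [this, Bool.false_and]

-- ===== VERDICT (by name: the statement is the Claim_ definition above) =====
theorem check_spec : Claim_equal_check := by
  intro n _ hpre
  unfold Spec_check
  have hpre' : (0:Int) ≤ n := hpre
  by_cases hg : (PySem.Int.toChars n).any (fun c => !(['2','3','5','7'].contains c)) = true
  · have hB : check_alt n = false := by
      unfold check_alt
      rw [if_pos hg]
    rw [hB]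
    by_cases h2 : 2 ≤ n
    · have h0 : (0:Int) < n := by omega
      rw [guard_eq n h0] at hg
      have hall : (digitsM n).all (fun d => [(2:Int),3,5,7].contains d) = false := by
        cases h : (digitsM n).all (fun d => [(2:Int),3,5,7].contains d)
        · rfl
        · rw [h] at hg; exact absurd hg (by decide)
      cases hA : isPrimeA n
      · unfold check; rw [hA]; rfl
      · unfold check
        rw [hA, if_neg (by decide)]
        cases hE : (PySem.Str.slice? (PySem.Int.toStr n) none none (-1)).bind PySem.Int.ofStr? with
        | none => rfl
        | some r =>
          dsimp only []
          cases hR : isPrimeA r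
          · rfl
          · rw [if_neg (by decide), digitLoopA_eq, hall]
            rfl
    · unfold check
      rw [isPrimeA_lt_two n (by omega)]
      rfl
  · have hgf : (PySem.Int.toChars n).any (fun c => !(['2','3','5','7'].contains c)) = false := by
      cases h : (PySem.Int.toChars n).any (fun c => !(['2','3','5','7'].contains c))
      · rfl
      · exact absurd h hg
    have h2 : (2:Int) ≤ n := by
      by_contra hc
      have hn01 : n = 0 ∨ n = 1 := by omega
      rcases hn01 with rfl | rfl <;> exact absurd hgf (by decide)
    have h0 : (0:Int) < n := by omega
    have hall : (digitsM n).all (fun d => [(2:Int),3,5,7].contains d) = true := by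
      rw [guard_eq n h0] at hgf
      cases h : (digitsM n).all (fun d => [(2:Int),3,5,7].contains d)
      · rw [h] at hgf; exact absurd hgf (by decide)
      · rfl
    cases hE : (PySem.Str.slice? (PySem.Int.toStr n) none none (-1)).bind PySem.Int.ofStr? with
    | none =>
      have hB : check_alt n = false := by
        unfold check_alt
        rw [if_neg hg, hE]
      rw [hB]
      cases hA : isPrimeA n
      · unfold check; rw [hA]; rfl
      · unfold check; rw [hA, if_neg (by decide), hE]
    | some rev =>
      have hdsum : ((PySem.Int.toChars n).map (fun c => ((c.toNat : Int) - 48))).sum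
          = (digitsM n).sum := dsum_eq n h0
      have Hn : goodB (primesB (isqrtI (max n rev))) n = isPrimeA n :=
        goodB_eq _ n (fun j hj hjj => le_isqrtI j _ hj (le_trans hjj (le_max_left _ _)))
      have Hr : goodB (primesB (isqrtI (max n rev))) rev = isPrimeA rev :=
        goodB_eq _ rev (fun j hj hjj => le_isqrtI j _ hj (le_trans hjj (le_max_right _ _)))
      have Hs : goodB (primesB (isqrtI (max n rev))) ((digitsM n).sum)
          = isPrimeA ((digitsM n).sum) :=
        goodB_eq _ _ (fun j hj hjj => le_isqrtI j _ hj
          (le_trans hjj (le_trans (digitsum_le n hpre') (le_max_left _ _))))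
      have hB : check_alt n
          = (isPrimeA n && (isPrimeA rev && isPrimeA ((digitsM n).sum))) := by
        unfold check_alt
        rw [if_neg hg, hE]
        dsimp only []
        rw [hdsum, Hn, Hr, Hs, Bool.and_assoc]
      rw [hB]
      cases hA : isPrimeA n
      · unfold check; rw [hA]; rfl
      · unfold check
        rw [hA, if_neg (by decide)]
        cases hE2 : (PySem.Str.slice? (PySem.Int.toStr n) none none (-1)).bind PySem.Int.ofStr? with
        | none => rw [hE2] at hE; exact absurd hE (by simp)
        | some r' =>
        rw [hE2] at hE
        obtain rfl : r' = rev := by injection hE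
        dsimp only []
        cases hR : isPrimeA r'
        · rfl
        · rw [if_neg (by decide), digitLoopA_eq, hall]
          rw [if_pos rfl]
          dsimp only []
          rw [zero_add]
          cases hS : isPrimeA ((digitsM n).sum)
          · rfl
          · rw [if_neg (by decide)]; rfl
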